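-- pv_equiv track=rewrite | github.com/Opohass/http_proj | kneighbors.py | get_final_answer
-- ===== SOURCE A (Python) =====
-- def get_final_answer(preds):
--     preds_dict = {}
--     for i in preds:
--         if i in preds_dict.keys():
--             preds_dict[i] += 1
--         else:
--             preds_dict[i] = 1
--     return list(preds_dict.keys())[list(preds_dict.values()).index(max(preds_dict.values()))]
-- ===== SOURCE B (Python) =====
-- def get_final_answer(preds):
--     # Mode by repeated scanning: max walks preds left-to-right and keeps the
--     # first element whose count is strictly largest, matching the dict
--     # version's first-insertion-order tie-break.
--     return max(preds, key=preds.count)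
-- ===== Notes on version B (the rewrite author's own statement) =====
-- stated objective: simpler
-- what changed: Replaces the counting dictionary plus keys/values/index argmax gymnastics with a single expression max(preds, key=preds.count) that rescans the list for each element's count.
import Mathlib
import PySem

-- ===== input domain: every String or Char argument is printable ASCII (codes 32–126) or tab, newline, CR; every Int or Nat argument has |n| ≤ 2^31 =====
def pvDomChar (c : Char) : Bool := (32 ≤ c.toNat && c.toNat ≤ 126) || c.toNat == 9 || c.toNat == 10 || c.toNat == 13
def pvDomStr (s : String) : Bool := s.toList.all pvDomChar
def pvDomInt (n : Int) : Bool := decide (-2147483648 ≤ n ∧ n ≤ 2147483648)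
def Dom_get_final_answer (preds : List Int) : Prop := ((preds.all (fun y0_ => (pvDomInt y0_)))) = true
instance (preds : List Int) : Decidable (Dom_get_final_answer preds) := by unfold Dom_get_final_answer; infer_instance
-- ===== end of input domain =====

-- B replaces A's counting dictionary + keys/values/index argmax with a single
-- max(preds, key=preds.count) scan (simpler, not faster); equal on nonempty input.


-- ===== PORT A =====
def get_final_answer (preds : List Int) : Int :=
  let preds_dict : PySem.Dict Int Int :=
    preds.foldl (fun d i =>
      if d.contains i then d.insert i (d.getD i 0 + 1) else d.insert i 1)
      PySem.Dict.empty
  -- list(preds_dict.keys())[list(preds_dict.values()).index(max(preds_dict.values()))]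
  match PySem.List.max? preds_dict.values (fun v => v) with
  | none => 0        -- max([]) raises ValueError: excluded by Pre_
  | some m =>
    match PySem.List.index? preds_dict.values m with
    | none => 0      -- ValueError: unreachable (m ∈ values)
    | some idx => (PySem.List.pyGet? preds_dict.keys (idx : Int)).getD 0

-- ===== PORT B =====
def get_final_answer_alt (preds : List Int) : Int :=
  -- max(preds, key=preds.count)
  match PySem.List.max? preds (fun x => (preds.count x : Int)) with
  | none => 0        -- max([]) raises ValueError: excluded by Pre_
  | some m => m

-- ===== PRECONDITION & SPEC =====
-- Python A raises ValueError (max() of an empty sequence) on empty input; B does too.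
def Pre_get_final_answer (preds : List Int) : Prop := preds ≠ []
instance (preds : List Int) : Decidable (Pre_get_final_answer preds) := by
  unfold Pre_get_final_answer; infer_instance
def pvWitness_get_final_answer : List Int := [1, 2, 2, 3]

def Spec_get_final_answer (preds : List Int) (out : Int) : Prop := out = get_final_answer_alt preds
instance (preds : List Int) (out : Int) : Decidable (Spec_get_final_answer preds out) := by unfold Spec_get_final_answer; infer_instance

-- ===== CLAIM (what is proved, stated in full; the proofs are below) =====
def Claim_equal_get_final_answer : Prop := ∀ (preds : List Int), Dom_get_final_answer preds → Pre_get_final_answer preds → Spec_get_final_answer preds (get_final_answer preds)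

-- ===== LEMMAS AND PROOFS =====

-- max? absorbs its first two elements into one (the running-max step)
theorem pvMaxTwo (f : Int -> Int) (x y : Int) (t : List Int) :
    PySem.List.max? (x :: y :: t) f
    = PySem.List.max? ((if f x < f y then y else x) :: t) f := by
  show List.foldl _ (if f x < f y then some y else some x) t
      = List.foldl _ (some (if f x < f y then y else x)) t
  congr 1
  split <;> rfl

-- unfolding one cons of max?
theorem pvMaxCons (f : Int -> Int) (x : Int) (t : List Int) :
    PySem.List.max? (x :: t) f
    = match PySem.List.max? t f with
      | none => some x
      | some m => if f x < f m then some m else some x := by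
  induction t generalizing x with
  | nil => simp [PySem.List.max?]
  | cons y t ih =>
    rw [pvMaxTwo, ih, ih]
    cases hm : PySem.List.max? t f with
    | none => by_cases hxy : f x < f y <;> simp [hxy]
    | some m =>
      by_cases hxy : f x < f y
      · by_cases hym : f y < f m
        · simp [hxy, hym, lt_trans hxy hym]
        · simp [hxy, hym]
      · by_cases hym : f y < f m
        · simp [hxy, hym]
        · have hxm : ¬ f x < f m :=
            not_lt.mpr (le_trans (not_lt.mp hym) (not_lt.mp hxy))
          simp [hxy, hym, hxm]

-- Python's max with a key returns the FIRST extremal element: split characterization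
theorem pvMaxIff (f : Int -> Int) (l : List Int) (m : Int) :
    PySem.List.max? l f = some m ↔
      ∃ l1 l2, l = l1 ++ m :: l2 ∧ (∀ y ∈ l1, f y < f m) ∧ (∀ y ∈ l2, f y ≤ f m) := by
  constructor
  · intro h
    induction l with
    | nil => simp [PySem.List.max?] at h
    | cons a t ih =>
      rw [pvMaxCons] at h
      cases hm : PySem.List.max? t f with
      | none =>
        rw [hm] at h
        replace h : some a = some m := h
        rw [PySem.List.max?_eq_none_iff] at hm
        exact ⟨[], [], by simp [hm, Option.some.inj h], by simp, by simp⟩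
      | some mt =>
        rw [hm] at h
        replace h : (if f a < f mt then some mt else some a) = some m := h
        by_cases hlt : f a < f mt
        · rw [if_pos hlt] at h
          obtain rfl : mt = m := Option.some.inj h
          obtain ⟨t1, t2, rfl, h1, h2⟩ := ih hm
          exact ⟨a :: t1, t2, by simp, by
            intro y hy; rcases List.mem_cons.mp hy with rfl | hy
            · exact hlt
            · exact h1 y hy, h2⟩
        · rw [if_neg hlt] at h
          obtain rfl : a = m := Option.some.inj h
          refine ⟨[], t, by simp, by simp, ?_⟩
          intro y hy
          have := PySem.List.max?_isMax hm y hy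
          exact le_trans this (not_lt.mp hlt)
  · rintro ⟨l1, l2, rfl, h1, h2⟩
    induction l1 with
    | nil =>
      simp only [List.nil_append]
      rw [pvMaxCons]
      cases hm : PySem.List.max? l2 f with
      | none => rfl
      | some mt =>
        have hmem := PySem.List.max?_mem hm
        show (if f m < f mt then some mt else some m) = some m
        rw [if_neg (not_lt.mpr (h2 mt hmem))]
    | cons a l1 ih =>
      have ha : f a < f m := h1 a (by simp)
      have ih' := ih (fun y hy => h1 y (List.mem_cons_of_mem a hy))
      simp only [List.cons_append]
      rw [pvMaxCons, ih']
      show (if f a < f m then some m else some a) = some m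
      rw [if_pos ha]

-- discard on a Nodup list is a filter
theorem pvDiscardEqFilter (s : List Int) (x : Int) :
    PySem.Set.discard s x = s.filter (fun y => y ≠ x) := by
  simp only [PySem.Set.discard]
  exact List.filter_congr (fun y _ => by by_cases h : y = x <;> simp [h])

-- dropping later duplicates of the head does not change max with key f
theorem pvMaxConsFilter (f : Int -> Int) (x : Int) (l : List Int) :
    PySem.List.max? (x :: l.filter (fun y => y ≠ x)) f
    = PySem.List.max? (x :: l) f := by
  rw [pvMaxCons, pvMaxCons]
  cases hm : PySem.List.max? l f with
  | none =>
    rw [PySem.List.max?_eq_none_iff] at hm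
    simp [hm, PySem.List.max?]
  | some m =>
    by_cases hmx : m = x
    · subst hmx
      cases hf : PySem.List.max? (l.filter (fun y => y ≠ m)) f with
      | none => simp
      | some m' =>
        have hm' : m' ∈ l := List.mem_of_mem_filter (PySem.List.max?_mem hf)
        have : ¬ f m < f m' := not_lt.mpr (PySem.List.max?_isMax hm m' hm')
        simp [this]
    · obtain ⟨l1, l2, rfl, h1, h2⟩ := (pvMaxIff f l m).mp hm
      have hf : PySem.List.max? ((l1 ++ m :: l2).filter (fun y => y ≠ x)) f = some m := by
        apply (pvMaxIff f _ m).mpr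
        refine ⟨l1.filter (fun y => y ≠ x), l2.filter (fun y => y ≠ x), ?_, ?_, ?_⟩
        · simp [List.filter_append, hmx]
        · intro y hy; exact h1 y (List.mem_of_mem_filter hy)
        · intro y hy; exact h2 y (List.mem_of_mem_filter hy)
      rw [hf]

-- max over the distinct elements (first-occurrence order) = max over the list
theorem pvMaxOfList (f : Int -> Int) (l : List Int) :
    PySem.List.max? (PySem.Set.ofList l) f = PySem.List.max? l f := by
  induction l with
  | nil => rfl
  | cons x t ih =>
    rw [PySem.Set.ofList_cons,
        pvDiscardEqFilter _ _,
        pvMaxConsFilter, pvMaxCons, ih, pvMaxCons]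

-- A's counting loop builds Counter(preds)
theorem pvFoldEqCounter (preds : List Int) :
    preds.foldl (fun d i =>
      if d.contains i then d.insert i (d.getD i 0 + 1) else d.insert i 1)
      PySem.Dict.empty = PySem.Dict.counter preds := by
  rw [PySem.List.foldl_congr_mem _ _ (fun d i => d.insert i (d.getD i 0 + 1))]
  · exact PySem.Dict.foldl_insert_getD_add_one_eq_counter preds
  · intro d x _
    cases hc : d.contains x with
    | true => simp
    | false => rw [PySem.Dict.getD_of_not_contains d 0 hc]; simp

-- ===== VERDICT (by name: the statement is the Claim_ definition above) =====
theorem get_final_answer_spec : Claim_equal_get_final_answer := by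
  intro preds _ hpre
  unfold Spec_get_final_answer get_final_answer get_final_answer_alt
  simp only [pvFoldEqCounter]
  have hvals : (PySem.Dict.counter preds).values
      = (PySem.Set.ofList preds).map (fun k => (preds.count k : Int)) := by
    show ((PySem.Dict.counter preds).items).map Prod.snd = _
    rw [PySem.Dict.items_counter]
    simp [List.map_map]
  have hkeys : (PySem.Dict.counter preds).keys = PySem.Set.ofList preds :=
    PySem.Dict.keys_counter preds
  have hSne : PySem.Set.ofList preds ≠ [] := by
    cases preds with
    | nil => exact absurd rfl hpre
    | cons p t => exact List.ne_nil_of_mem ((PySem.Set.mem_ofList _ p).mpr (by simp))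
  have hvne : (PySem.Set.ofList preds).map (fun k => (preds.count k : Int)) ≠ [] := by
    simpa using hSne
  rw [hvals, hkeys]
  cases hm : PySem.List.max? ((PySem.Set.ofList preds).map (fun k => (preds.count k : Int)))
      (fun v => v) with
  | none => exact absurd ((PySem.List.max?_eq_none_iff _ _).mp hm) hvne
  | some m =>
    have hmmem := PySem.List.max?_mem hm
    have hmax := PySem.List.max?_isMax hm
    cases hidx : PySem.List.index? ((PySem.Set.ofList preds).map (fun k => (preds.count k : Int))) m with
    | none =>
      rw [PySem.List.index?_eq_none_iff] at hidx
      exact absurd hmmem hidx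
    | some j =>
      obtain ⟨pre, suf, hsplit, hlen, hnotm⟩ := (PySem.List.index?_eq_some_iff _ _ _).mp hidx
      obtain ⟨s1, rest, hq1, hs1, hrest⟩ := List.map_eq_append_iff.mp hsplit
      obtain ⟨c, s2, hq2, hc, hs2⟩ := List.map_eq_cons_iff.mp hrest
      have hq : PySem.Set.ofList preds = s1 ++ c :: s2 := by rw [hq1, hq2]
      have hget : PySem.List.pyGet? (PySem.Set.ofList preds) ((j : Nat) : Int) = some c := by
        rw [hq, PySem.List.pyGet?_natCast, ← hlen, ← hs1]
        simp only [List.length_map]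
        rw [List.getElem?_append_right (le_refl _)]
        simp
      have hBS : PySem.List.max? (PySem.Set.ofList preds) (fun k => (preds.count k : Int)) = some c := by
        rw [hq]
        apply (pvMaxIff _ _ c).mpr
        refine ⟨s1, s2, rfl, ?_, ?_⟩
        · intro y hy
          have hmem : ((preds.count y : Int)) ∈ pre := by
            rw [← hs1]; exact List.mem_map_of_mem hy
          have hle : ((preds.count y : Int)) ≤ m :=
            hmax _ (by rw [hsplit]; exact List.mem_append_left _ hmem)
          have hne : ((preds.count y : Int)) ≠ m := fun h => hnotm (h ▸ hmem)
          rw [hc]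
          exact lt_of_le_of_ne hle hne
        · intro y hy
          have hmem : ((preds.count y : Int)) ∈ suf := by
            rw [← hs2]; exact List.mem_map_of_mem hy
          rw [hc]
          exact hmax _ (by rw [hsplit]; exact List.mem_append_right _ (List.mem_cons_of_mem _ hmem))
      have hB : PySem.List.max? preds (fun k => (preds.count k : Int)) = some c := by
        rw [← pvMaxOfList]; exact hBS
      simp only [hidx, hB, hget, Option.getD_some]
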